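-- pv_equiv track=rewrite | github.com/flathub-infra/backend | app/apps.py | merge_apps
-- ===== SOURCE A (Python) =====
-- def merge_apps(apps_beta, apps_stable):
--     apps = {}
--     for appid in apps_stable:
--         apps[appid] = {"stable": apps_stable[appid]}
--
--     for appid in apps_beta:
--         if appid not in apps:
--             apps[appid] = {"beta": apps_beta[appid]}
--         else:
--             apps[appid] = {"stable": apps_stable[appid], "beta": apps_beta[appid]}
--
--     return apps
-- ===== SOURCE B (Python) =====
-- def merge_apps(apps_beta, apps_stable):
--     # Group-by: tag both item streams, concatenate, group pairs per appid, then
--     # turn each group into its entry dict. No lookups into the source dicts.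
--     tagged = [(appid, ("stable", info)) for appid, info in apps_stable.items()] + [
--         (appid, ("beta", info)) for appid, info in apps_beta.items()
--     ]
--     groups = {}
--     for appid, pair in tagged:
--         groups[appid] = groups.get(appid, []) + [pair]
--     return {appid: dict(pairs) for appid, pairs in groups.items()}
-- ===== Notes on version B (the rewrite author's own statement) =====
-- stated objective: alternative
-- what changed: B replaces A's seed-then-patch passes (seed result with stable entries, then patch/append beta entries using lookups into both source dicts) with a tag-concatenate-group-by pipeline: both item streams are tagged with their channel and concatenated, the (channel, info) pairs are grouped per appid, and each group list is finalized into its entry dict, with no lookups into the source dicts.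
import Mathlib
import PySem

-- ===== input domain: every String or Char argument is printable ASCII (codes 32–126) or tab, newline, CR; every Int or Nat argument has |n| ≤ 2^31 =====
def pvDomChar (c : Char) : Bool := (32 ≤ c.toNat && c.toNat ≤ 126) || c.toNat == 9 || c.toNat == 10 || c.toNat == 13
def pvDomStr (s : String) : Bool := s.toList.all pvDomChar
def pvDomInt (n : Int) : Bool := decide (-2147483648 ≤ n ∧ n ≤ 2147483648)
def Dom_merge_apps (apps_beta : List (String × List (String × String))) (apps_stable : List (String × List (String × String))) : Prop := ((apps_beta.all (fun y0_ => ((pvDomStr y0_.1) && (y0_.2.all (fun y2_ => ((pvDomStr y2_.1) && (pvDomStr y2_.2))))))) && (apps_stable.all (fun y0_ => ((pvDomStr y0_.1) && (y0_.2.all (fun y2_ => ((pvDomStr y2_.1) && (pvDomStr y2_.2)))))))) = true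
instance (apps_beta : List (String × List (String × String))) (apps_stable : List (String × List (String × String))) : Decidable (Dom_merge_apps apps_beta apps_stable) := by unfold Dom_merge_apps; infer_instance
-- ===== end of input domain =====

-- B merges by a different algorithm: tag and concatenate both item streams, group the pairs by appid, then finalize each group into its entry dict (no lookups into the source dicts); objective: alternative, same cost.


-- ===== PORT A =====
-- A: seed the result with stable entries, then patch/append beta entries (two passes).
-- The List parameters are the item lists of Python dicts; PySem.Dict.ofList rebuilds the dict exactly.
def merge_apps (apps_beta : List (String × List (String × String))) (apps_stable : List (String × List (String × String))) : List (String × List (String × List (String × String))) :=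
  let dB := PySem.Dict.ofList apps_beta
  let dS := PySem.Dict.ofList apps_stable
  let apps1 := dS.keys.foldl (fun m appid => m.insert appid [("stable", dS.getD appid [])]) PySem.Dict.empty
  let apps2 := dB.keys.foldl (fun m appid =>
      if m.contains appid = false then m.insert appid [("beta", dB.getD appid [])]
      else m.insert appid [("stable", dS.getD appid []), ("beta", dB.getD appid [])]) apps1
  apps2.items

-- ===== PORT B =====
-- B: tag both item streams ("stable" first), concatenate, group the (channel, info) pairs
-- by appid ('groups[appid] = groups.get(appid, []) + [pair]' is Dict.modify), then turn each
-- group into its entry dict (the final dict comprehension).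
def merge_apps_alt (apps_beta : List (String × List (String × String))) (apps_stable : List (String × List (String × String))) : List (String × List (String × List (String × String))) :=
  let dB := PySem.Dict.ofList apps_beta
  let dS := PySem.Dict.ofList apps_stable
  let tagged := dS.items.map (fun p => (p.1, ("stable", p.2))) ++ dB.items.map (fun p => (p.1, ("beta", p.2)))
  let groups := tagged.foldl (fun g q => g.modify q.1 [] (fun v => v ++ [q.2])) PySem.Dict.empty
  (PySem.Dict.ofList (groups.items.map (fun q => (q.1, (PySem.Dict.ofList q.2).items)))).items

-- ===== PRECONDITION & SPEC =====
def Spec_merge_apps (apps_beta : List (String × List (String × String))) (apps_stable : List (String × List (String × String))) (out : List (String × List (String × List (String × String)))) : Prop := out = merge_apps_alt apps_beta apps_stable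
instance (apps_beta : List (String × List (String × String))) (apps_stable : List (String × List (String × String))) (out : List (String × List (String × List (String × String)))) : Decidable (Spec_merge_apps apps_beta apps_stable out) := by unfold Spec_merge_apps; infer_instance

-- ===== CLAIM (what is proved, stated in full; the proofs are below) =====
def Claim_equal_merge_apps : Prop := ∀ (apps_beta : List (String × List (String × String))) (apps_stable : List (String × List (String × String))), Dom_merge_apps apps_beta apps_stable → Spec_merge_apps apps_beta apps_stable (merge_apps apps_beta apps_stable)

-- ===== LEMMAS AND PROOFS =====

-- A's second loop: overwrite the keys already present, append the fresh ones.
theorem items_foldl_step {V : Type} (ks : List String) (d : PySem.Dict String V) (B C : String → V)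
    (h1 : ks.Nodup) :
    (ks.foldl (fun m k => if m.contains k = false then m.insert k (C k) else m.insert k (B k)) d).items
      = d.items.map (fun p => if p.1 ∈ ks then (p.1, B p.1) else p)
        ++ (ks.filter (fun k => !d.contains k)).map (fun k => (k, C k)) := by
  induction ks generalizing d with
  | nil => simp
  | cons k ks ih =>
    have hk_not : k ∉ ks := (List.nodup_cons.mp h1).1
    simp only [List.foldl_cons, List.filter_cons]
    by_cases hc : d.contains k = true
    · rw [if_neg (by simp [hc]), ih _ (List.Nodup.of_cons h1),
        PySem.Dict.items_insert_of_contains _ _ hc, List.map_map]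
      congr 1
      · apply List.map_congr_left
        intro p _
        by_cases hpk : p.1 = k
        · simp [Function.comp, hpk, hk_not]
        · have hb : (p.1 == k) = false := by simp [hpk]
          simp [Function.comp, hb, hpk]
      · simp only [hc, Bool.not_true]
        rw [if_neg (by simp)]
        apply congrArg
        apply List.filter_congr
        intro x hx
        have hxk : (x == k) = false := by
          simp only [beq_eq_false_iff_ne, ne_eq]; rintro rfl; exact hk_not hx
        rw [PySem.Dict.contains_insert]
        simp [hxk]
    · have hc' : d.contains k = false := by simpa using hc
      rw [if_pos hc', ih _ (List.Nodup.of_cons h1),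
        PySem.Dict.items_insert_of_not_contains _ _ hc']
      have hknotin : k ∉ d.keys := by
        intro h
        rw [PySem.Dict.contains_eq_decide_mem_keys] at hc'
        simp [h] at hc'
      simp only [List.map_append, List.map_cons, List.map_nil, if_neg hk_not,
        hc', Bool.not_false, if_pos trivial]
      rw [show ∀ (a : List (String × V)) (x) (b c : List (String × V)), a ++ (x :: b) ++ c = a ++ x :: (b ++ c) from by intros; simp]
      congr 1
      · apply List.map_congr_left
        intro p hp
        have hpk : p.1 ≠ k := fun h => hknotin (h ▸ PySem.Dict.mem_keys_of_mem_items d hp)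
        simp [hpk]
      · rw [List.nil_append]
        have hfeq : List.filter (fun x => !(d.insert k (C k)).contains x) ks
            = List.filter (fun x => !d.contains x) ks := by
          apply List.filter_congr
          intro x hx
          have hxk : (x == k) = false := by
            simp only [beq_eq_false_iff_ne, ne_eq]; rintro rfl; exact hk_not hx
          rw [PySem.Dict.contains_insert]
          simp [hxk]
        rw [hfeq]

-- filtering an association list with distinct keys for one key
theorem filter_key_of_mem {β : Type} (l : List (String × β)) (k : String) (v : β)
    (h : (l.map Prod.fst).Nodup) (hm : (k, v) ∈ l) :
    l.filter (fun p => p.1 == k) = [(k, v)] := by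
  induction l with
  | nil => cases hm
  | cons a t ih =>
    rcases List.mem_cons.mp hm with rfl | hmt
    · have h' := List.nodup_cons.mp (by simpa using h : ((k :: t.map Prod.fst).Nodup))
      have hkt : k ∉ t.map Prod.fst := h'.1
      have ht : t.filter (fun p => p.1 == k) = [] := by
        apply List.filter_eq_nil_iff.mpr
        intro p hp
        have : p.1 ≠ k := fun he => hkt (he ▸ List.mem_map_of_mem hp)
        simp [this]
      simp [ht]
    · have h' := List.nodup_cons.mp (show ((a.1 :: t.map Prod.fst).Nodup) by simpa using h)
      have ha : a.1 ≠ k := by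
        intro he
        exact h'.1 (he ▸ List.mem_map_of_mem (f := Prod.fst) hmt)
      simp only [List.filter_cons]
      rw [if_neg (by simp [ha])]
      exact ih h'.2 hmt

theorem filter_key_of_not_mem {β : Type} (l : List (String × β)) (k : String)
    (hk : k ∉ l.map Prod.fst) :
    l.filter (fun p => p.1 == k) = [] := by
  apply List.filter_eq_nil_iff.mpr
  intro p hp
  have : p.1 ≠ k := fun he => hk (he ▸ List.mem_map_of_mem hp)
  simp [this]

-- dict of an association list whose keys are already distinct
theorem items_ofList_of_nodup {β : Type} (l : List (String × β))
    (h : (l.map Prod.fst).Nodup) :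
    (PySem.Dict.ofList l).items = l := by
  show (l.foldl (fun d p => d.insert p.1 p.2) PySem.Dict.empty).items = l
  rw [PySem.Dict.items_foldl_insert_fresh l (fun p => p.1) (fun p => p.2) PySem.Dict.empty
      (fun a _ => PySem.Dict.contains_empty _) h]
  show PySem.Dict.empty.items ++ _ = _
  simp [show (PySem.Dict.empty : PySem.Dict String β).items = [] from rfl]

-- the two-key entry dicts built by B's final comprehension
theorem items_ofList_pair (sv bv : List (String × String)) :
    (PySem.Dict.ofList [("stable", sv), ("beta", bv)]).items = [("stable", sv), ("beta", bv)] := by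
  show ([("stable", sv), ("beta", bv)].foldl (fun d p => d.insert p.1 p.2) PySem.Dict.empty).items = _
  simp [PySem.Dict.items_insert, PySem.Dict.contains_insert, PySem.Dict.contains_empty]
  rfl

theorem items_ofList_single (tag : String) (v : List (String × String)) :
    (PySem.Dict.ofList [(tag, v)]).items = [(tag, v)] := by
  show ([(tag, v)].foldl (fun d p => d.insert p.1 p.2) PySem.Dict.empty).items = _
  simp [PySem.Dict.items_insert, PySem.Dict.contains_empty]
  rfl

-- ===== VERDICT (by name: the statement is the Claim_ definition above) =====
theorem merge_apps_spec : Claim_equal_merge_apps := by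
  intro apps_beta apps_stable _
  unfold Spec_merge_apps merge_apps merge_apps_alt
  set dB := PySem.Dict.ofList apps_beta with hdB
  set dS := PySem.Dict.ofList apps_stable with hdS
  have hndS : dS.keys.Nodup := PySem.Dict.nodup_keys_ofList _
  have hndB : dB.keys.Nodup := PySem.Dict.nodup_keys_ofList _
  have hemp : (PySem.Dict.empty : PySem.Dict String (List (String × List (String × String)))).items = [] := rfl
  -- ===== A side =====
  have hA1 : (dS.keys.foldl (fun m appid => m.insert appid [("stable", dS.getD appid [])]) PySem.Dict.empty).items
      = dS.keys.map (fun k => (k, [("stable", dS.getD k [])])) := by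
    rw [PySem.Dict.items_foldl_insert_fresh dS.keys (fun a => a) (fun k => [("stable", dS.getD k [])]) _
      (fun a _ => PySem.Dict.contains_empty _) (by simpa using hndS)]
    simp [hemp]
  have hA1keys : (dS.keys.foldl (fun m appid => m.insert appid [("stable", dS.getD appid [])]) PySem.Dict.empty).keys
      = dS.keys := by
    rw [PySem.Dict.keys_foldl_insert]
    rw [PySem.Dict.keys_empty, PySem.Set.update_nil_left, PySem.Set.ofList_eq_self_of_nodup _ hndS]
  rw [items_foldl_step _ _ (fun k => [("stable", dS.getD k []), ("beta", dB.getD k [])])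
      (fun k => [("beta", dB.getD k [])]) hndB, hA1]
  -- ===== B side =====
  set tagged := dS.items.map (fun p => (p.1, ("stable", p.2))) ++ dB.items.map (fun p => (p.1, ("beta", p.2))) with htagged
  set groups := tagged.foldl (fun g q => g.modify q.1 [] (fun v => v ++ [q.2])) (PySem.Dict.empty : PySem.Dict String (List (String × List (String × String)))) with hgroups
  have htagfst : tagged.map Prod.fst = dS.keys ++ dB.keys := by
    rw [htagged]
    simp [PySem.Dict.keys, Function.comp_def]
  have hGkeys : groups.keys = dS.keys ++ dB.keys.filter (fun y => !PySem.Set.contains dS.keys y) := by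
    rw [hgroups, PySem.Dict.keys_foldl_modify_key tagged Prod.fst [] (fun _ q v => v ++ [q.2]) _,
      htagfst, PySem.Dict.keys_empty, PySem.Set.update_nil_left, PySem.Set.ofList_append,
      PySem.Set.ofList_eq_self_of_nodup _ hndS, PySem.Set.update_eq_append_filter,
      PySem.Set.ofList_eq_self_of_nodup _ hndB]
  have hGnodup : groups.keys.Nodup := by
    rw [hgroups]
    exact PySem.Dict.nodup_keys_foldl_modify_key tagged Prod.fst [] (fun _ q v => v ++ [q.2]) _
      PySem.Dict.nodup_keys_empty
  have hGgetD : ∀ c, groups.getD c [] = (tagged.filter (fun p => p.1 == c)).map (fun x => x.2) := by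
    intro c
    rw [hgroups, PySem.Dict.getD_foldl_modify_append tagged PySem.Dict.empty c,
      PySem.Dict.getD_empty]
    simp
  have hGitems : groups.items = groups.keys.map (fun k => (k, groups.getD k [])) :=
    PySem.Dict.items_eq_map_keys groups hGnodup []
  rw [items_ofList_of_nodup _ (by
    rw [hGitems]
    simpa [Function.comp_def] using hGnodup), hGitems]
  rw [List.map_map, List.map_map, hGkeys, List.map_append]
  -- filter helpers
  have hfilS_mem : ∀ k ∈ dS.keys, dS.items.filter (fun p => p.1 == k) = [(k, dS.getD k [])] := by
    intro k hk
    refine filter_key_of_mem _ _ _ (by simpa [PySem.Dict.keys] using hndS) ?_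
    rw [PySem.Dict.items_eq_map_keys dS hndS []]
    exact List.mem_map_of_mem hk
  have hfilB_mem : ∀ k ∈ dB.keys, dB.items.filter (fun p => p.1 == k) = [(k, dB.getD k [])] := by
    intro k hk
    refine filter_key_of_mem _ _ _ (by simpa [PySem.Dict.keys] using hndB) ?_
    rw [PySem.Dict.items_eq_map_keys dB hndB []]
    exact List.mem_map_of_mem hk
  have hfilS_not : ∀ k, k ∉ dS.keys → dS.items.filter (fun p => p.1 == k) = [] := by
    intro k hk
    exact filter_key_of_not_mem _ _ (by simpa [PySem.Dict.keys] using hk)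
  have hfilB_not : ∀ k, k ∉ dB.keys → dB.items.filter (fun p => p.1 == k) = [] := by
    intro k hk
    exact filter_key_of_not_mem _ _ (by simpa [PySem.Dict.keys] using hk)
  have htagfil : ∀ k, tagged.filter (fun p => p.1 == k)
      = (dS.items.filter (fun p => p.1 == k)).map (fun p => (p.1, ("stable", p.2)))
        ++ (dB.items.filter (fun p => p.1 == k)).map (fun p => (p.1, ("beta", p.2))) := by
    intro k
    rw [htagged, List.filter_append]
    congr 1 <;> (rw [List.filter_map]; congr 1)
  congr 1
  · -- stable-keyed segment
    apply List.map_congr_left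
    intro k hk
    have hent := hGgetD k
    rw [htagfil k, hfilS_mem k hk] at hent
    by_cases hB : k ∈ dB.keys
    · have hBc : dB.contains k = true := by
        rw [PySem.Dict.contains_eq_decide_mem_keys]; simp [hB]
      rw [hfilB_mem k hB] at hent
      simp only [List.map_append, List.map_cons, List.map_nil] at hent
      simp [hB, hent, items_ofList_pair]
    · rw [hfilB_not k hB] at hent
      simp only [List.map_cons, List.map_nil, List.append_nil] at hent
      simp [hB, hent, items_ofList_single]
  · -- beta-only segment
    have hfeq : dB.keys.filter (fun k => !(dS.keys.foldl (fun m appid => m.insert appid [("stable", dS.getD appid [])]) PySem.Dict.empty).contains k)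
        = dB.keys.filter (fun y => !PySem.Set.contains dS.keys y) := by
      apply List.filter_congr
      intro x _
      rw [PySem.Dict.contains_eq_decide_mem_keys, hA1keys]
      simp [PySem.Set.contains]
    rw [hfeq]
    apply List.map_congr_left
    intro k hk
    have hkB : k ∈ dB.keys := (List.mem_filter.mp hk).1
    have hkS : k ∉ dS.keys := by
      have := (List.mem_filter.mp hk).2
      simpa [PySem.Set.contains] using this
    have hent := hGgetD k
    rw [htagfil k, hfilS_not k hkS, hfilB_mem k hkB] at hent
    simp only [List.map_nil, List.map_cons, List.nil_append] at hent
    simp [hent, items_ofList_single]
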